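-- pv_equiv track=rewrite | github.com/pabloatria/dentalprecios-scraper | scrapers/matchers.py | pick_canonical_name
-- ===== SOURCE A (Python) =====
-- def pick_canonical_name(names: list) -> str:
--     """Pick the best canonical name from the group.
--
--     Prefers names that:
--     1. Contain a known brand
--     2. Are shorter (more concise)
--     """
--     if not names:
--         return ""
--     if len(names) == 1:
--         return names[0]
--
--     # Prefer names with a known brand, then shortest
--     with_brand = [n for n in names if extract_brand(n) is not None]
--     candidates = with_brand if with_brand else names
--     return sorted(candidates, key=len)[0]
--
-- KNOWN_BRANDS = [
--     "3m", "solventum", "dentsply", "ivoclar", "kerr", "gc", "voco",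
--     "coltene", "ultradent", "maquira", "fgm", "angelus", "kulzer",
--     "zhermack", "bisco", "septodont", "hu-friedy", "nsk", "woodpecker",
--     "medit", "phrozen", "asiga", "scheu", "nextdent", "formlabs",
--     "orbis", "peclab", "wanhao", "espe", "clinpro", "tokuyama",
--     "shofu", "premier", "sdi", "densco", "bredent", "vita",
--     "straumann", "nobel biocare", "osstem", "neodent", "megagen",
--     "galderma", "merz", "allergan",
--     "biodinamica", "eighteeth", "renfert", "kuraray", "dte",
--     "coltene", "sprintray", "detax", "mani", "microdont",
-- ]
--
-- def extract_brands(name: str) -> set[str]: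
--     """Extract ALL matching brands from a product name."""
--     name_lower = name.lower()
--     found = set()
--     for brand in KNOWN_BRANDS:
--         if brand in name_lower:
--             found.add(brand.upper())
--     return found
--
-- def extract_brand(name: str) -> str | None:
--     """Try to extract the primary brand from product name."""
--     brands = extract_brands(name)
--     if not brands:
--         return None
--     # Return the longest match (more specific: "NOBEL BIOCARE" over "GC")
--     return max(brands, key=len)
-- ===== SOURCE B (Python) =====
-- _BRANDS = ("3m,solventum,dentsply,ivoclar,kerr,gc,voco,coltene,ultradent,maquira,"
--            "fgm,angelus,kulzer,zhermack,bisco,septodont,hu-friedy,nsk,woodpecker,"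
--            "medit,phrozen,asiga,scheu,nextdent,formlabs,orbis,peclab,wanhao,espe,"
--            "clinpro,tokuyama,shofu,premier,sdi,densco,bredent,vita,straumann,"
--            "nobel biocare,osstem,neodent,megagen,galderma,merz,allergan,"
--            "biodinamica,eighteeth,renfert,kuraray,dte,coltene,sprintray,detax,"
--            "mani,microdont").split(",")
--
--
-- def _branded(name: str) -> bool:
--     low = name.lower()
--     for b in _BRANDS:
--         if b in low:
--             return True
--     return False
--
--
-- def pick_canonical_name(names: list) -> str:
--     """One explicit pass keeping the current best candidate (brand first, then shorter)."""
--     best = ""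
--     best_branded = False
--     have = False
--     for n in names:
--         nb = _branded(n)
--         if (not have
--                 or (nb and not best_branded)
--                 or (nb == best_branded and len(n) < len(best))):
--             best, best_branded, have = n, nb, True
--     return best
-- ===== Notes on version B (the rewrite author's own statement) =====
-- stated objective: simpler
-- what changed: Replaces A's per-name brand-set construction plus filter/fallback plus stable sort-then-index with a single explicit best-so-far loop keeping (best, best_branded) and an early-exit brand scan, so no intermediate lists are built.
import Mathlib
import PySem

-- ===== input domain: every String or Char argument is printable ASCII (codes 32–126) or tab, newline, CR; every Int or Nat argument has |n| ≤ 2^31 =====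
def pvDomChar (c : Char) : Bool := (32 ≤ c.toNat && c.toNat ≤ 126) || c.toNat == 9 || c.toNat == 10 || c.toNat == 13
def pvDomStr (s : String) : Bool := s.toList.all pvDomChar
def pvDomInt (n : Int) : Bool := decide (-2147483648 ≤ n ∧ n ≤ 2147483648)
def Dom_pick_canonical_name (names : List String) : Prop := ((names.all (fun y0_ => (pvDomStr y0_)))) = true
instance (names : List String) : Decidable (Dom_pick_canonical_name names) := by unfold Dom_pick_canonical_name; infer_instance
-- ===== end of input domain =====

-- B replaces A's filter + fallback + stable sort with one explicit best-so-far scan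
-- (objective: simpler); equality of the return value is proved below.

-- ===== PORT A =====
def KNOWN_BRANDS : List String :=
  ["3m", "solventum", "dentsply", "ivoclar", "kerr", "gc", "voco",
   "coltene", "ultradent", "maquira", "fgm", "angelus", "kulzer",
   "zhermack", "bisco", "septodont", "hu-friedy", "nsk", "woodpecker",
   "medit", "phrozen", "asiga", "scheu", "nextdent", "formlabs",
   "orbis", "peclab", "wanhao", "espe", "clinpro", "tokuyama",
   "shofu", "premier", "sdi", "densco", "bredent", "vita",
   "straumann", "nobel biocare", "osstem", "neodent", "megagen",
   "galderma", "merz", "allergan",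
   "biodinamica", "eighteeth", "renfert", "kuraray", "dte",
   "coltene", "sprintray", "detax", "mani", "microdont"]

def extract_brands (name : String) : PySem.Set String :=
  let name_lower := PySem.Str.lower name
  KNOWN_BRANDS.foldl
    (fun found brand =>
      if PySem.Str.isIn brand name_lower then found.add (PySem.Str.upper brand) else found)
    PySem.Set.empty

-- max(brands, key=len) iterates a Python set, whose order is unspecified; we take the
-- set in insertion order (first extremal wins). pick_canonical_name only tests the
-- result for None, so this choice cannot affect the entry's value.
def extract_brand (name : String) : Option String :=
  let brands := extract_brands name
  if brands = [] then none
  else PySem.List.max? brands (fun b => PySem.Str.len b)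

def pick_canonical_name (names : List String) : String :=
  if names = [] then ""
  else if names.length = 1 then names.headI   -- names[0]; in range, length = 1
  else
    let with_brand := names.filter (fun n => (extract_brand n).isSome)
    let candidates := if with_brand = [] then names else with_brand
    (PySem.List.sorted candidates (fun n => PySem.Str.len n) false).headI
      -- sorted(candidates, key=len)[0]; in range since candidates is nonempty

-- ===== PORT B =====
-- the same brand inventory, written as Source B writes it: one joined literal, split on ","
def pvBrands : List String :=
  (PySem.Str.split? ("3m,solventum,dentsply,ivoclar,kerr,gc,voco,coltene,ultradent,maquira," ++
    "fgm,angelus,kulzer,zhermack,bisco,septodont,hu-friedy,nsk,woodpecker," ++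
    "medit,phrozen,asiga,scheu,nextdent,formlabs,orbis,peclab,wanhao,espe," ++
    "clinpro,tokuyama,shofu,premier,sdi,densco,bredent,vita,straumann," ++
    "nobel biocare,osstem,neodent,megagen,galderma,merz,allergan," ++
    "biodinamica,eighteeth,renfert,kuraray,dte,coltene,sprintray,detax," ++
    "mani,microdont") ",").getD []   -- getD: split? is none only for an empty separator

-- Source B's for-loop over _BRANDS with early return, as structural recursion
def pvBrandScan (low : String) : List String → Bool
  | [] => false
  | b :: bs => if PySem.Str.isIn b low then true else pvBrandScan low bs

def pvBranded (name : String) : Bool :=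
  pvBrandScan (PySem.Str.lower name) pvBrands

-- Source B's main loop: state = (best, best_branded, have)
def pvPickGo : List String → String → Bool → Bool → String
  | [], best, _, _ => best
  | n :: rest, best, bb, seen =>
    let nb := pvBranded n
    if !seen || (nb && !bb) || ((nb == bb) && decide (PySem.Str.len n < PySem.Str.len best))
    then pvPickGo rest n nb true
    else pvPickGo rest best bb seen

def pick_canonical_name_alt (names : List String) : String :=
  pvPickGo names "" false false

-- ===== PRECONDITION & SPEC =====
def Spec_pick_canonical_name (names : List String) (out : String) : Prop := out = pick_canonical_name_alt names
instance (names : List String) (out : String) : Decidable (Spec_pick_canonical_name names out) := by unfold Spec_pick_canonical_name; infer_instance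

-- ===== CLAIM (what is proved, stated in full; the proofs are below) =====
def Claim_equal_pick_canonical_name : Prop := ∀ (names : List String), Dom_pick_canonical_name names → Spec_pick_canonical_name names (pick_canonical_name names)

-- ===== LEMMAS AND PROOFS =====

-- the running-first-minimum step used after the first element
def minStep (k2 : String → Int) (o : Option String) (x : String) : Option String :=
  match o with
  | none => some x
  | some m => if k2 x < k2 m then some x else some m

-- the canonical composite-key step (brand flag first, then length)
def cStep (o : Option String) (x : String) : Option String :=
  match o with
  | none => some x
  | some m =>
    if pvBranded m = pvBranded x then (if PySem.Str.len x < PySem.Str.len m then some x else some m)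
    else if pvBranded x then some x else some m

-- the two brand inventories are the same list
set_option maxRecDepth 40000 in
lemma pvBrands_eq : pvBrands = KNOWN_BRANDS := by decide

lemma brandScan_eq_any (low : String) (l : List String) :
    pvBrandScan low l = l.any (fun b => PySem.Str.isIn b low) := by
  induction l with
  | nil => rfl
  | cons b bs ih =>
    show (if PySem.Str.isIn b low then true else pvBrandScan low bs) = _
    rw [List.any_cons, ih]
    cases PySem.Str.isIn b low <;> simp

-- A's membership test equals B's: extract_brand is Some iff some known brand occurs.
lemma set_add_ne_nil (s : PySem.Set String) (x : String) : PySem.Set.add s x ≠ [] := by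
  unfold PySem.Set.add
  split
  · exact List.ne_nil_of_mem ((PySem.Set.contains_iff s x).mp (by assumption))
  · simp

lemma foldl_add_eq_nil_iff (p : String → Bool) (f : String → String) (l : List String)
    (s : PySem.Set String) :
    (l.foldl (fun acc b => if p b then PySem.Set.add acc (f b) else acc) s) = [] ↔
      s = [] ∧ ∀ b ∈ l, p b = false := by
  induction l generalizing s with
  | nil => simp
  | cons x xs ih =>
    simp only [List.foldl_cons]
    by_cases hx : p x
    · simp only [hx, ite_true]
      rw [ih]
      constructor
      · rintro ⟨hadd, _⟩
        exact absurd hadd (set_add_ne_nil s (f x))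
      · rintro ⟨-, hall⟩
        exact absurd (hall x (List.mem_cons_self)) (by simp [hx])
    · simp only [hx, Bool.false_eq_true, if_false]
      rw [ih]
      constructor
      · rintro ⟨h1, h2⟩
        refine ⟨h1, ?_⟩
        intro b hb
        rcases List.mem_cons.mp hb with rfl | hb'
        · simpa using hx
        · exact h2 b hb'
      · rintro ⟨h1, h2⟩
        exact ⟨h1, fun b hb => h2 b (List.mem_cons_of_mem x hb)⟩

lemma extract_brand_isSome (n : String) :
    (extract_brand n).isSome = pvBranded n := by
  have h1 : extract_brand n = if extract_brands n = [] then none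
      else PySem.List.max? (extract_brands n) (fun b => PySem.Str.len b) := rfl
  have h2 : pvBranded n
      = KNOWN_BRANDS.any (fun b => PySem.Str.isIn b (PySem.Str.lower n)) := by
    unfold pvBranded
    rw [pvBrands_eq, brandScan_eq_any]
  rw [h1, h2]
  by_cases h : extract_brands n = []
  · have hall := ((foldl_add_eq_nil_iff (fun b => PySem.Str.isIn b (PySem.Str.lower n))
      (fun b => PySem.Str.upper b) KNOWN_BRANDS PySem.Set.empty).mp
        (by simpa [extract_brands, PySem.Set.empty] using h)).2
    rw [if_pos h]
    symm
    simp only [Option.isSome_none, List.any_eq_false]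
    intro b hb
    simpa using hall b hb
  · rw [if_neg h]
    have hany : KNOWN_BRANDS.any (fun b => PySem.Str.isIn b (PySem.Str.lower n)) = true := by
      by_contra hno
      refine h ((foldl_add_eq_nil_iff _ _ _ _).mpr ⟨rfl, ?_⟩)
      intro b hb
      simpa using (List.any_eq_false.mp (Bool.eq_false_iff.mpr hno)) b hb
    rw [hany]
    cases hm : PySem.List.max? (extract_brands n) (fun b => PySem.Str.len b) with
    | none => exact absurd ((PySem.List.max?_eq_none_iff _ _).mp hm) h
    | some m => rfl

-- B's loop, once an element is held, is the canonical composite-key fold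
set_option maxRecDepth 4000 in
lemma pickGo_eq_fold (rest : List String) (best : String) (bb : Bool)
    (h : bb = pvBranded best) :
    pvPickGo rest best bb true = (rest.foldl cStep (some best)).getD "" := by
  induction rest generalizing best bb with
  | nil => rfl
  | cons n t ih =>
    simp only [pvPickGo, List.foldl_cons]
    have hcs : cStep (some best) n =
        if pvBranded best = pvBranded n
        then (if PySem.Str.len n < PySem.Str.len best then some n else some best)
        else if pvBranded n then some n else some best := rfl
    subst h
    cases hm : pvBranded best <;> cases hx : pvBranded n <;>
      by_cases hlt : PySem.Str.len n < PySem.Str.len best <;>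
        simp only [hcs, hm, hx, hlt, Bool.not_true, Bool.not_false, Bool.and_true,
          Bool.and_false, Bool.or_false, Bool.or_true, Bool.false_or, Bool.true_or,
          beq_self_eq_true, decide_true, decide_false, ite_true, ite_false, beq_iff_eq,
          Bool.false_eq_true, Bool.true_eq_false]
    · exact ih n false hx.symm
    · exact ih best false hm.symm
    · exact ih n true hx.symm
    · exact ih n true hx.symm
    · exact ih best true hm.symm
    · exact ih best true hm.symm
    · exact ih n true hx.symm
    · exact ih best true hm.symm

-- head of the stable insertion sort = the running first-minimum fold.
lemma head?_insertBy (before : String → String → Bool) (x : String) (acc : List String) :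
    (PySem.List.insertBy before x acc).head? =
      match acc with
      | [] => some x
      | h :: _ => if before x h then some x else some h := by
  cases acc with
  | nil => rfl
  | cons h t =>
    show (if before x h then x :: h :: t else h :: PySem.List.insertBy before x t).head? = _
    by_cases hbf : before x h <;> simp [hbf]

lemma head?_foldl_insertBy (key : String → Int) (xs acc : List String) :
    (xs.foldl (fun acc x => PySem.List.insertBy (fun a b => decide (key a < key b)) x acc) acc).head?
      = xs.foldl (minStep key) acc.head? := by
  induction xs generalizing acc with
  | nil => rfl
  | cons x t ih =>
    simp only [List.foldl_cons]
    rw [ih, head?_insertBy]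
    cases acc with
    | nil => rfl
    | cons h r =>
      by_cases hlt : key x < key h
      · simp [hlt, minStep]
      · simp [hlt, minStep]

lemma head?_sorted_eq_min? (key : String → Int) (xs : List String) :
    (PySem.List.sorted xs key false).head? = xs.foldl (minStep key) none := by
  unfold PySem.List.sorted
  simpa using head?_foldl_insertBy key xs []

-- the composite-key fold decomposes by whether a brand-bearing element was seen
lemma cfold_decompose_gen (hb : String → Bool) (k2 : String → Int)
    (f : Option String → String → Option String)
    (hf : ∀ m x, f (some m) x =
      if hb m = hb x then (if k2 x < k2 m then some x else some m)
      else if hb x then some x else some m)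
    (xs : List String) (m : String) :
    xs.foldl f (some m)
      = (if hb m then (xs.filter hb).foldl (minStep k2) (some m)
         else
          match xs.filter hb with
          | [] => xs.foldl (minStep k2) (some m)
          | b :: bs => bs.foldl (minStep k2) (some b)) := by
  induction xs generalizing m with
  | nil => by_cases h : hb m <;> simp [h]
  | cons x t ih =>
    rw [List.foldl_cons, hf m x]
    by_cases hm : hb m <;> by_cases hx : hb x
    · rw [if_pos (by rw [hm, hx]), List.filter_cons_of_pos (by simpa using hx), if_pos hm,
        List.foldl_cons]
      by_cases hlt : k2 x < k2 m
      · rw [if_pos hlt, ih x, if_pos hx]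
        simp [minStep, hlt]
      · rw [if_neg hlt, ih m, if_pos hm]
        simp [minStep, hlt]
    · rw [if_neg (by simp [hm, hx]), if_neg (by simp [hx]), ih m,
        List.filter_cons_of_neg (by simpa using hx), if_pos hm]
      rw [if_pos hm]
    · rw [if_neg (by simp [hm, hx]), if_pos hx, ih x, if_pos hx,
        List.filter_cons_of_pos (by simpa using hx), if_neg (by simp [hm])]
    · have hmf : hb m = false := by simpa using hm
      have hxf : hb x = false := by simpa using hx
      rw [if_pos (by rw [hmf, hxf])]
      by_cases hlt : k2 x < k2 m
      · rw [if_pos hlt, ih x, List.filter_cons_of_neg (by simp [hxf])]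
        cases hf2 : t.filter hb with
        | nil => simp [hmf, hxf, minStep, hlt]
        | cons b bs => simp [hmf, hxf]
      · rw [if_neg hlt, ih m, List.filter_cons_of_neg (by simp [hxf])]
        cases hf2 : t.filter hb with
        | nil => simp [hmf, minStep, hlt]
        | cons b bs => simp [hmf]

lemma cfold_decompose (xs : List String) (m : String) :
    xs.foldl cStep (some m)
      = (if pvBranded m then (xs.filter pvBranded).foldl (minStep PySem.Str.len) (some m)
         else
          match xs.filter pvBranded with
          | [] => xs.foldl (minStep PySem.Str.len) (some m)
          | b :: bs => bs.foldl (minStep PySem.Str.len) (some b)) := by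
  exact cfold_decompose_gen pvBranded PySem.Str.len cStep (fun _ _ => rfl) xs m

-- a min fold seeded with an element always returns an element
lemma foldl_minStep_isSome (k2 : String → Int) (l : List String) (m : String) :
    ∃ v, l.foldl (minStep k2) (some m) = some v := by
  induction l generalizing m with
  | nil => exact ⟨m, rfl⟩
  | cons x t ih =>
    simp only [List.foldl_cons, minStep]
    by_cases hlt : k2 x < k2 m <;> simp only [hlt, ite_true, ite_false] <;> exact ih _

-- ===== VERDICT (by name: the statement is the Claim_ definition above) =====
theorem pick_canonical_name_spec : Claim_equal_pick_canonical_name := by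
  intro names _
  unfold Spec_pick_canonical_name pick_canonical_name pick_canonical_name_alt
  cases names with
  | nil => simp [pvPickGo]
  | cons n rest =>
    have hb_eq : (fun s => (extract_brand s).isSome) = pvBranded :=
      funext extract_brand_isSome
    rw [if_neg (List.cons_ne_nil n rest)]
    have hfirst : pvPickGo (n :: rest) "" false false = pvPickGo rest n (pvBranded n) true := by
      simp only [pvPickGo, Bool.not_false, Bool.true_or, if_true]
    rw [hfirst, pickGo_eq_fold rest n (pvBranded n) rfl, cfold_decompose rest n]
    cases rest with
    | nil =>
      by_cases h : pvBranded n <;> simp [h]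
    | cons r rs =>
      rw [if_neg (by simp)]
      simp only [hb_eq]
      by_cases hn : pvBranded n
      · rw [List.filter_cons_of_pos (by simpa using hn), if_pos hn,
          if_neg (List.cons_ne_nil _ _)]
        obtain ⟨v, hv⟩ := foldl_minStep_isSome PySem.Str.len
          ((r :: rs).filter pvBranded) n
        have hhead : (PySem.List.sorted (n :: (r :: rs).filter pvBranded)
            (fun s => PySem.Str.len s) false).head? = some v := by
          rw [head?_sorted_eq_min?]
          simpa [minStep] using hv
        cases hs : PySem.List.sorted (n :: (r :: rs).filter pvBranded)
            (fun s => PySem.Str.len s) false with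
        | nil => rw [hs] at hhead; simp at hhead
        | cons c cs =>
          rw [hs] at hhead
          simp only [List.head?_cons, Option.some.injEq] at hhead
          subst hhead
          simp [hv]
      · rw [List.filter_cons_of_neg (by simpa using hn)]
        cases hf : (r :: rs).filter pvBranded with
        | nil =>
          rw [if_pos rfl, if_neg (by simp [hn])]
          obtain ⟨v, hv⟩ := foldl_minStep_isSome PySem.Str.len (r :: rs) n
          have hhead : (PySem.List.sorted (n :: r :: rs)
              (fun s => PySem.Str.len s) false).head? = some v := by
            rw [head?_sorted_eq_min?]
            simpa [minStep] using hv
          cases hs : PySem.List.sorted (n :: r :: rs) (fun s => PySem.Str.len s) false with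
          | nil => rw [hs] at hhead; simp at hhead
          | cons c cs =>
            rw [hs] at hhead
            simp only [List.head?_cons, Option.some.injEq] at hhead
            subst hhead
            simp [hv]
        | cons b bs =>
          rw [if_neg (by simp), if_neg (by simp [hn])]
          obtain ⟨v, hv⟩ := foldl_minStep_isSome PySem.Str.len bs b
          have hhead : (PySem.List.sorted (b :: bs)
              (fun s => PySem.Str.len s) false).head? = some v := by
            rw [head?_sorted_eq_min?]
            simpa [minStep] using hv
          cases hs : PySem.List.sorted (b :: bs) (fun s => PySem.Str.len s) false with
          | nil => rw [hs] at hhead; simp at hhead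
          | cons c cs =>
            rw [hs] at hhead
            simp only [List.head?_cons, Option.some.injEq] at hhead
            subst hhead
            simp [hv]
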